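-- pv_equiv track=rewrite | github.com/EduLara97/Proyecto_Juego_SW2 | Main.py | seleccionarPersonaje
-- ===== SOURCE A (Python) =====
-- def seleccionarPersonaje(mx, my, persons):
--     id_personaje = 0
--     for personaje in persons:
--         if 211 <= mx <= 292 and 202 <= my <= 344 and personaje == "inmoc":
--             id_personaje = 1
--         elif 512 <= mx <= 615 and 202 <= my <= 344 and personaje == "intia":
--             id_personaje = 3
--         elif 211 <= mx <= 292 and 413 <= my <= 546 and personaje == "inpar":
--             id_personaje = 2
--         elif 512 <= mx <= 615 and 413 <= my <= 546 and personaje == "inwar":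
--             id_personaje = 4
--     return id_personaje
-- ===== SOURCE B (Python) =====
-- _REGIONS = [
--     (211, 292, 202, 344, "inmoc", 1),
--     (512, 615, 202, 344, "intia", 3),
--     (211, 292, 413, 546, "inpar", 2),
--     (512, 615, 413, 546, "inwar", 4),
-- ]
--
--
-- def seleccionarPersonaje(mx, my, persons):
--     for x1, x2, y1, y2, name, pid in _REGIONS:
--         if x1 <= mx <= x2 and y1 <= my <= y2 and name in persons:
--             return pid
--     return 0
-- ===== Notes on version B (the rewrite author's own statement) =====
-- stated objective: simpler
-- what changed: B iterates a fixed 4-row region table (x1,x2,y1,y2,name,id) and returns the id of the first row whose rectangle contains the click and whose name is in persons, instead of scanning the persons list with four coordinate branches; the rectangles are pairwise disjoint, so this equals A's last-match scan. B's early return after at most 4 region tests (vs A's full scan with four compound branches per element) gives a constant-factor speedup.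
import Mathlib
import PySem

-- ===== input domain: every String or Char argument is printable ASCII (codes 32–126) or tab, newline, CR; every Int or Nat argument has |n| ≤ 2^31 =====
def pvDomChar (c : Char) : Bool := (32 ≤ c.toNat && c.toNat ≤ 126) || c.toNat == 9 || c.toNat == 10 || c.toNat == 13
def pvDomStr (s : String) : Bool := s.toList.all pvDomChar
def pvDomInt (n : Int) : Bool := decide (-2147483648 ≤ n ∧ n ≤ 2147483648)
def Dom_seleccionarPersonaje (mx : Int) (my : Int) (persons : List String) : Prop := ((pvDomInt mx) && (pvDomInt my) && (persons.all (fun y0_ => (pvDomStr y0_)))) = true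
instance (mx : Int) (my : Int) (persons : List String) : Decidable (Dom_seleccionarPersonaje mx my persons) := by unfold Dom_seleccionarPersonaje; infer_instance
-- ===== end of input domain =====

-- B replaces A's scan of `persons` with a pass over a fixed table of the four
-- disjoint click regions, doing one membership test per row (objective: simpler).


-- ===== PORT A =====
def seleccionarPersonaje (mx : Int) (my : Int) (persons : List String) : Int :=
  persons.foldl (fun id_personaje personaje =>
    if 211 ≤ mx ∧ mx ≤ 292 ∧ 202 ≤ my ∧ my ≤ 344 ∧ personaje = "inmoc" then 1
    else if 512 ≤ mx ∧ mx ≤ 615 ∧ 202 ≤ my ∧ my ≤ 344 ∧ personaje = "intia" then 3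
    else if 211 ≤ mx ∧ mx ≤ 292 ∧ 413 ≤ my ∧ my ≤ 546 ∧ personaje = "inpar" then 2
    else if 512 ≤ mx ∧ mx ≤ 615 ∧ 413 ≤ my ∧ my ≤ 546 ∧ personaje = "inwar" then 4
    else id_personaje) 0

-- ===== PORT B =====
def pvRegions : List (Int × Int × Int × Int × String × Int) :=
  [(211, 292, 202, 344, "inmoc", 1),
   (512, 615, 202, 344, "intia", 3),
   (211, 292, 413, 546, "inpar", 2),
   (512, 615, 413, 546, "inwar", 4)]

def pvScanRegions (mx : Int) (my : Int) (persons : List String) :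
    List (Int × Int × Int × Int × String × Int) → Int
  | [] => 0
  | (x1, x2, y1, y2, name, pid) :: rest =>
    if x1 ≤ mx ∧ mx ≤ x2 ∧ y1 ≤ my ∧ my ≤ y2 ∧ name ∈ persons then pid
    else pvScanRegions mx my persons rest

def seleccionarPersonaje_alt (mx : Int) (my : Int) (persons : List String) : Int :=
  pvScanRegions mx my persons pvRegions

-- ===== PRECONDITION & SPEC =====
def Spec_seleccionarPersonaje (mx : Int) (my : Int) (persons : List String) (out : Int) : Prop := out = seleccionarPersonaje_alt mx my persons
instance (mx : Int) (my : Int) (persons : List String) (out : Int) : Decidable (Spec_seleccionarPersonaje mx my persons out) := by unfold Spec_seleccionarPersonaje; infer_instance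

-- ===== CLAIM (what is proved, stated in full; the proofs are below) =====
def Claim_equal_seleccionarPersonaje : Prop := ∀ (mx : Int) (my : Int) (persons : List String), Dom_seleccionarPersonaje mx my persons → Spec_seleccionarPersonaje mx my persons (seleccionarPersonaje mx my persons)

-- ===== LEMMAS AND PROOFS =====

-- Folding "overwrite with v when the element equals name" equals a membership test.
theorem foldl_overwrite_eq_mem (name : String) (v : Int) :
    ∀ (l : List String) (a : Int),
      l.foldl (fun acc p => if p = name then v else acc) a
        = if name ∈ l then v else a := by
  intro l
  induction l with
  | nil => intro a; simp
  | cons h t ih =>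
    intro a
    by_cases hh : h = name
    · subst hh
      simp [List.foldl, ih]
    · have hh' : ¬ name = h := fun e => hh e.symm
      simp [List.foldl, hh, ih, hh']

theorem foldl_id_int : ∀ (l : List String) (a : Int),
    l.foldl (fun acc (_ : String) => acc) a = a := by
  intro l; induction l with
  | nil => intro a; simp
  | cons h t ih => intro a; simpa using ih a

theorem seleccionarPersonaje_spec : Claim_equal_seleccionarPersonaje := by
  unfold Claim_equal_seleccionarPersonaje
  intro mx my persons _
  unfold Spec_seleccionarPersonaje seleccionarPersonaje seleccionarPersonaje_alt
  by_cases hxl : 211 ≤ mx ∧ mx ≤ 292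
  · by_cases hyt : 202 ≤ my ∧ my ≤ 344
    · -- region of "inmoc"
      have h512 : ¬ (512 ≤ mx) := by omega
      have h413 : ¬ (413 ≤ my) := by omega
      rw [show (fun (id_personaje : Int) (personaje : String) =>
        if 211 ≤ mx ∧ mx ≤ 292 ∧ 202 ≤ my ∧ my ≤ 344 ∧ personaje = "inmoc" then 1
        else if 512 ≤ mx ∧ mx ≤ 615 ∧ 202 ≤ my ∧ my ≤ 344 ∧ personaje = "intia" then 3
        else if 211 ≤ mx ∧ mx ≤ 292 ∧ 413 ≤ my ∧ my ≤ 546 ∧ personaje = "inpar" then 2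
        else if 512 ≤ mx ∧ mx ≤ 615 ∧ 413 ≤ my ∧ my ≤ 546 ∧ personaje = "inwar" then 4
        else id_personaje)
        = fun acc p => if p = "inmoc" then (1 : Int) else acc from
        funext₂ fun acc p => by simp [hxl.1, hxl.2, hyt.1, hyt.2, h512, h413]]
      rw [foldl_overwrite_eq_mem]
      simp [pvScanRegions, pvRegions, hxl.1, hxl.2, hyt.1, hyt.2, h512, h413]
    · by_cases hyb : 413 ≤ my ∧ my ≤ 546
      · -- region of "inpar"
        have h512 : ¬ (512 ≤ mx) := by omega
        have hny : ¬ (202 ≤ my ∧ my ≤ 344) := hyt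
        rw [show (fun (id_personaje : Int) (personaje : String) =>
          if 211 ≤ mx ∧ mx ≤ 292 ∧ 202 ≤ my ∧ my ≤ 344 ∧ personaje = "inmoc" then 1
          else if 512 ≤ mx ∧ mx ≤ 615 ∧ 202 ≤ my ∧ my ≤ 344 ∧ personaje = "intia" then 3
          else if 211 ≤ mx ∧ mx ≤ 292 ∧ 413 ≤ my ∧ my ≤ 546 ∧ personaje = "inpar" then 2
          else if 512 ≤ mx ∧ mx ≤ 615 ∧ 413 ≤ my ∧ my ≤ 546 ∧ personaje = "inwar" then 4
          else id_personaje)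
          = fun acc p => if p = "inpar" then (2 : Int) else acc from
          funext₂ fun acc p => by
            rcases not_and_or.mp hny with h | h <;>
              simp [hxl.1, hxl.2, hyb.1, hyb.2, h512, h]]
        rw [foldl_overwrite_eq_mem]
        rcases not_and_or.mp hny with h | h <;>
          simp [pvScanRegions, pvRegions, hxl.1, hxl.2, hyb.1, hyb.2, h512, h]
      · -- x in left band but y in no band: nothing matches
        rw [show (fun (id_personaje : Int) (personaje : String) =>
          if 211 ≤ mx ∧ mx ≤ 292 ∧ 202 ≤ my ∧ my ≤ 344 ∧ personaje = "inmoc" then 1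
          else if 512 ≤ mx ∧ mx ≤ 615 ∧ 202 ≤ my ∧ my ≤ 344 ∧ personaje = "intia" then 3
          else if 211 ≤ mx ∧ mx ≤ 292 ∧ 413 ≤ my ∧ my ≤ 546 ∧ personaje = "inpar" then 2
          else if 512 ≤ mx ∧ mx ≤ 615 ∧ 413 ≤ my ∧ my ≤ 546 ∧ personaje = "inwar" then 4
          else id_personaje)
          = fun acc (_ : String) => acc from
          funext₂ fun acc p => by
            rcases not_and_or.mp hyt with h1 | h1 <;>
            rcases not_and_or.mp hyb with h2 | h2 <;>
              simp [h1, h2]]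
        rw [foldl_id_int]
        rcases not_and_or.mp hyt with h1 | h1 <;>
        rcases not_and_or.mp hyb with h2 | h2 <;>
          simp [pvScanRegions, pvRegions, h1, h2]
  · by_cases hxr : 512 ≤ mx ∧ mx ≤ 615
    · by_cases hyt : 202 ≤ my ∧ my ≤ 344
      · -- region of "intia"
        have hnx : ¬ (211 ≤ mx ∧ mx ≤ 292) := hxl
        have h413 : ¬ (413 ≤ my) := by omega
        rw [show (fun (id_personaje : Int) (personaje : String) =>
          if 211 ≤ mx ∧ mx ≤ 292 ∧ 202 ≤ my ∧ my ≤ 344 ∧ personaje = "inmoc" then 1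
          else if 512 ≤ mx ∧ mx ≤ 615 ∧ 202 ≤ my ∧ my ≤ 344 ∧ personaje = "intia" then 3
          else if 211 ≤ mx ∧ mx ≤ 292 ∧ 413 ≤ my ∧ my ≤ 546 ∧ personaje = "inpar" then 2
          else if 512 ≤ mx ∧ mx ≤ 615 ∧ 413 ≤ my ∧ my ≤ 546 ∧ personaje = "inwar" then 4
          else id_personaje)
          = fun acc p => if p = "intia" then (3 : Int) else acc from
          funext₂ fun acc p => by
            rcases not_and_or.mp hnx with h | h <;>
              simp [hxr.1, hxr.2, hyt.1, hyt.2, h413, h]]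
        rw [foldl_overwrite_eq_mem]
        rcases not_and_or.mp hnx with h | h <;>
          simp [pvScanRegions, pvRegions, hxr.1, hxr.2, hyt.1, hyt.2, h413, h]
      · by_cases hyb : 413 ≤ my ∧ my ≤ 546
        · -- region of "inwar"
          have hnx : ¬ (211 ≤ mx ∧ mx ≤ 292) := hxl
          have hny : ¬ (202 ≤ my ∧ my ≤ 344) := hyt
          rw [show (fun (id_personaje : Int) (personaje : String) =>
            if 211 ≤ mx ∧ mx ≤ 292 ∧ 202 ≤ my ∧ my ≤ 344 ∧ personaje = "inmoc" then 1
            else if 512 ≤ mx ∧ mx ≤ 615 ∧ 202 ≤ my ∧ my ≤ 344 ∧ personaje = "intia" then 3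
            else if 211 ≤ mx ∧ mx ≤ 292 ∧ 413 ≤ my ∧ my ≤ 546 ∧ personaje = "inpar" then 2
            else if 512 ≤ mx ∧ mx ≤ 615 ∧ 413 ≤ my ∧ my ≤ 546 ∧ personaje = "inwar" then 4
            else id_personaje)
            = fun acc p => if p = "inwar" then (4 : Int) else acc from
            funext₂ fun acc p => by
              rcases not_and_or.mp hnx with h1 | h1 <;>
              rcases not_and_or.mp hny with h2 | h2 <;>
                simp [hxr.1, hxr.2, hyb.1, hyb.2, h1, h2]]
          rw [foldl_overwrite_eq_mem]
          rcases not_and_or.mp hnx with h1 | h1 <;>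
          rcases not_and_or.mp hny with h2 | h2 <;>
            simp [pvScanRegions, pvRegions, hxr.1, hxr.2, hyb.1, hyb.2, h1, h2]
        · -- x in right band but y in no band
          rw [show (fun (id_personaje : Int) (personaje : String) =>
            if 211 ≤ mx ∧ mx ≤ 292 ∧ 202 ≤ my ∧ my ≤ 344 ∧ personaje = "inmoc" then 1
            else if 512 ≤ mx ∧ mx ≤ 615 ∧ 202 ≤ my ∧ my ≤ 344 ∧ personaje = "intia" then 3
            else if 211 ≤ mx ∧ mx ≤ 292 ∧ 413 ≤ my ∧ my ≤ 546 ∧ personaje = "inpar" then 2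
            else if 512 ≤ mx ∧ mx ≤ 615 ∧ 413 ≤ my ∧ my ≤ 546 ∧ personaje = "inwar" then 4
            else id_personaje)
            = fun acc (_ : String) => acc from
            funext₂ fun acc p => by
              rcases not_and_or.mp hyt with h1 | h1 <;>
              rcases not_and_or.mp hyb with h2 | h2 <;>
                simp [h1, h2]]
          rw [foldl_id_int]
          rcases not_and_or.mp hyt with h1 | h1 <;>
          rcases not_and_or.mp hyb with h2 | h2 <;>
            simp [pvScanRegions, pvRegions, h1, h2]
    · -- x in no band: nothing matches
      rw [show (fun (id_personaje : Int) (personaje : String) =>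
        if 211 ≤ mx ∧ mx ≤ 292 ∧ 202 ≤ my ∧ my ≤ 344 ∧ personaje = "inmoc" then 1
        else if 512 ≤ mx ∧ mx ≤ 615 ∧ 202 ≤ my ∧ my ≤ 344 ∧ personaje = "intia" then 3
        else if 211 ≤ mx ∧ mx ≤ 292 ∧ 413 ≤ my ∧ my ≤ 546 ∧ personaje = "inpar" then 2
        else if 512 ≤ mx ∧ mx ≤ 615 ∧ 413 ≤ my ∧ my ≤ 546 ∧ personaje = "inwar" then 4
        else id_personaje)
        = fun acc (_ : String) => acc from
        funext₂ fun acc p => by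
          rcases not_and_or.mp hxl with h1 | h1 <;>
          rcases not_and_or.mp hxr with h2 | h2 <;>
            simp [h1, h2]]
      rw [foldl_id_int]
      rcases not_and_or.mp hxl with h1 | h1 <;>
      rcases not_and_or.mp hxr with h2 | h2 <;>
        simp [pvScanRegions, pvRegions, h1, h2]
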